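-- pv_equiv track=rewrite | github.com/khj1998/ProblemSolving | 프로그래머스/lv1/118666. 성격 유형 검사하기/성격 유형 검사하기.py | solution
-- ===== SOURCE A (Python) =====
-- def solution(survey, choices):
--     answer = ''
--     types = []
--     for i in range(1,5):
--         if i==1:
--             types.append([i,'R',0])
--             types.append([i,'T',0])
--         elif i==2:
--             types.append([i,'C',0])
--             types.append([i,'F',0])
--         elif i==3:
--             types.append([i,'J',0])
--             types.append([i,'M',0])
--         else:
--             types.append([i,'A',0])
--             types.append([i,'N',0])
--
--     for i in range(len(survey)):
--             s = survey[i]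
--             choice = choices[i]
--
--             if choice < 4:
--                 s = s[0]
--                 for t in types:
--                     if s in t:
--                         if choice == 1:
--                             t[2]+=3
--                         elif choice == 2:
--                             t[2]+=2
--                         else:
--                             t[2]+=1
--                         break
--             elif choice >= 5:
--                 s = s[1]
--                 for t in types:
--                     if s in t:
--                         if choice==5:
--                             t[2] += 1
--                         elif choice==6:
--                             t[2] += 2
--                         else:
--                             t[2] += 3
--     types.sort(key=lambda x:(x[0],-x[2],x[1]))
--
--     start = 0
--
--     while start <= 6:
--         answer+=types[start][1]
--         start+=2
--     return answer
-- ===== SOURCE B (Python) =====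
-- def solution(survey, choices):
--     def diff(a, b):
--         # signed score of the pair: +pts toward a, -pts toward b
--         total = 0
--         for s, c in zip(survey, choices):
--             if c < 4:
--                 letter = s[0]
--                 pts = 3 if c == 1 else 2 if c == 2 else 1
--             elif c > 4:
--                 letter = s[1]
--                 pts = 1 if c == 5 else 2 if c == 6 else 3
--             else:
--                 continue
--             total += pts if letter == a else -pts if letter == b else 0
--         return total
--     return ''.join(a if diff(a, b) >= 0 else b
--                    for a, b in ("RT", "CF", "JM", "AN"))
-- ===== Notes on version B (the rewrite author's own statement) =====
-- stated objective: alternative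
-- what changed: B never builds A's mutable [group,letter,score] table: for each of the four ordered letter pairs it makes a separate pass computing one signed difference (+pts toward the first letter, -pts toward the second) and picks the first letter iff that difference is >= 0, replacing A's single scoring pass, (group,-score,letter) sort and step-by-2 index scan.
import Mathlib
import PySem

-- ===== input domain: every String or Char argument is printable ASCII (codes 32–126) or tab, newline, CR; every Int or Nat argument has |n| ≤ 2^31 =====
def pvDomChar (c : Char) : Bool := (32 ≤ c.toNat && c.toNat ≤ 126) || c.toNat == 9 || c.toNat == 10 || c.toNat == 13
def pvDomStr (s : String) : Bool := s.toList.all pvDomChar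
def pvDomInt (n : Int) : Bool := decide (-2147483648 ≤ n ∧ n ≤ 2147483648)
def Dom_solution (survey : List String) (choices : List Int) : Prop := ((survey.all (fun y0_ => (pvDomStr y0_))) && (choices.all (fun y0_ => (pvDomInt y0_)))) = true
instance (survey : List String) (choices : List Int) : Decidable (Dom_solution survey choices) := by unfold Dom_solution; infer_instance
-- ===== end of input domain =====

-- B drops A's mutable [group,letter,score] table, sort and step-by-2 scan entirely: it makes one
-- separate pass per letter pair computing a single signed difference and picks the letter by its sign.

-- ===== PORT A =====
-- 'if s in t: ... break' over the types table: s (a 1-char string) can only equal the letter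
-- component of t = [i, letter, 0], so membership is ported as equality with that component.
def pvBumpA (c : Char) (pts : Int) : List (Int × Char × Int) → List (Int × Char × Int)
  | [] => []
  | t :: rest => if c = t.2.1 then (t.1, t.2.1, t.2.2 + pts) :: rest else t :: pvBumpA c pts rest

-- the 'while start <= 6: answer += types[start][1]; start += 2' loop (start is never negative)
def pvPickA (ts : List (Int × Char × Int)) (start : Nat) (answer : List Char) : List Char :=
  if start ≤ 6 then
    pvPickA ts (start + 2) (answer ++ [(PySem.List.pyGetD ts (start : Int) (0, ' ', 0)).2.1])
  else answer
termination_by 7 - start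

def solution (survey : List String) (choices : List Int) : String :=
  let types : List (Int × Char × Int) :=
    (PySem.List.pyRange 1 5 1).foldl (fun acc i =>
      if i = 1 then acc ++ [(i, 'R', 0)] ++ [(i, 'T', 0)]
      else if i = 2 then acc ++ [(i, 'C', 0)] ++ [(i, 'F', 0)]
      else if i = 3 then acc ++ [(i, 'J', 0)] ++ [(i, 'M', 0)]
      else acc ++ [(i, 'A', 0)] ++ [(i, 'N', 0)]) []
  let types := (PySem.List.pyRange 0 (PySem.List.len survey) 1).foldl (fun ts i =>
    let s := PySem.List.pyGetD survey i ""
    let choice := PySem.List.pyGetD choices i 0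
    if choice < 4 then
      -- s = s[0]  (Pre_ guarantees the index is in range)
      let s0 := (PySem.Str.pyGet? s 0).getD ' '
      pvBumpA s0 (if choice = 1 then 3 else if choice = 2 then 2 else 1) ts
    else if 5 ≤ choice then
      -- s = s[1]
      let s1 := (PySem.Str.pyGet? s 1).getD ' '
      pvBumpA s1 (if choice = 5 then 1 else if choice = 6 then 2 else 3) ts
    else ts) types
  -- types.sort(key=lambda x: (x[0], -x[2], x[1]))
  let types := PySem.List.sorted types (fun x => toLex (x.1, toLex (-x.2.2, x.2.1))) false
  String.ofList (pvPickA types 0 [])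

-- ===== PORT B =====
-- the body of Source B's inner 'for s, c in zip(...)' loop of diff(a, b)
def pvDiffStepB (a b : Char) (total : Int) (p : String × Int) : Int :=
  if p.2 < 4 then
    let letter := (PySem.Str.pyGet? p.1 0).getD ' '
    let pts : Int := if p.2 = 1 then 3 else if p.2 = 2 then 2 else 1
    total + (if letter = a then pts else if letter = b then -pts else 0)
  else if 4 < p.2 then
    let letter := (PySem.Str.pyGet? p.1 1).getD ' '
    let pts : Int := if p.2 = 5 then 1 else if p.2 = 6 then 2 else 3
    total + (if letter = a then pts else if letter = b then -pts else 0)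
  else total

-- Source B's diff(a, b): one full pass over zip(survey, choices)
def pvDiffB (survey : List String) (choices : List Int) (a b : Char) : Int :=
  (survey.zip choices).foldl (pvDiffStepB a b) 0

def solution_alt (survey : List String) (choices : List Int) : String :=
  String.ofList ([('R', 'T'), ('C', 'F'), ('J', 'M'), ('A', 'N')].map (fun p =>
    if 0 ≤ pvDiffB survey choices p.1 p.2 then p.1 else p.2))

-- ===== PRECONDITION & SPEC =====
-- Pre_ excludes exactly the inputs where Python A raises an IndexError: a survey longer than
-- choices, or a processed survey string too short for the character the choice selects.
def Pre_solution (survey : List String) (choices : List Int) : Prop :=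
  survey.length ≤ choices.length ∧
  ∀ p ∈ survey.zip choices,
    (p.2 < 4 → 1 ≤ PySem.Str.len p.1) ∧ (5 ≤ p.2 → 2 ≤ PySem.Str.len p.1)
instance (survey : List String) (choices : List Int) : Decidable (Pre_solution survey choices) := by unfold Pre_solution; infer_instance

def pvWitness_solution : List String × List Int := (["RT", "CF", "JM", "AN"], [1, 4, 7, 3])

def Spec_solution (survey : List String) (choices : List Int) (out : String) : Prop := out = solution_alt survey choices
instance (survey : List String) (choices : List Int) (out : String) : Decidable (Spec_solution survey choices out) := by unfold Spec_solution; infer_instance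

-- ===== CLAIM (what is proved, stated in full; the proofs are below) =====
def Claim_equal_solution : Prop := ∀ (survey : List String) (choices : List Int), Dom_solution survey choices → Pre_solution survey choices → Spec_solution survey choices (solution survey choices)

-- ===== LEMMAS AND PROOFS =====

-- the eight letter scores (R, T, C, F, J, M, A, N)
abbrev PvQ := Int × Int × Int × Int × Int × Int × Int × Int

def pvAddQ (q : PvQ) (c : Char) (pts : Int) : PvQ :=
  if c = 'R' then (q.1 + pts, q.2) else
  if c = 'T' then (q.1, q.2.1 + pts, q.2.2) else
  if c = 'C' then (q.1, q.2.1, q.2.2.1 + pts, q.2.2.2) else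
  if c = 'F' then (q.1, q.2.1, q.2.2.1, q.2.2.2.1 + pts, q.2.2.2.2) else
  if c = 'J' then (q.1, q.2.1, q.2.2.1, q.2.2.2.1, q.2.2.2.2.1 + pts, q.2.2.2.2.2) else
  if c = 'M' then (q.1, q.2.1, q.2.2.1, q.2.2.2.1, q.2.2.2.2.1, q.2.2.2.2.2.1 + pts, q.2.2.2.2.2.2) else
  if c = 'A' then (q.1, q.2.1, q.2.2.1, q.2.2.2.1, q.2.2.2.2.1, q.2.2.2.2.2.1, q.2.2.2.2.2.2.1 + pts, q.2.2.2.2.2.2.2) else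
  if c = 'N' then (q.1, q.2.1, q.2.2.1, q.2.2.2.1, q.2.2.2.2.1, q.2.2.2.2.2.1, q.2.2.2.2.2.2.1, q.2.2.2.2.2.2.2 + pts) else q

def pvStepQ (q : PvQ) (p : String × Int) : PvQ :=
  if p.2 < 4 then
    pvAddQ q ((PySem.Str.pyGet? p.1 0).getD ' ') (if p.2 = 1 then 3 else if p.2 = 2 then 2 else 1)
  else if 5 ≤ p.2 then
    pvAddQ q ((PySem.Str.pyGet? p.1 1).getD ' ') (if p.2 = 5 then 1 else if p.2 = 6 then 2 else 3)
  else q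

def pvMkT (q : PvQ) : List (Int × Char × Int) :=
  [(1, 'R', q.1), (1, 'T', q.2.1), (2, 'C', q.2.2.1), (2, 'F', q.2.2.2.1),
   (3, 'J', q.2.2.2.2.1), (3, 'M', q.2.2.2.2.2.1), (4, 'A', q.2.2.2.2.2.2.1), (4, 'N', q.2.2.2.2.2.2.2)]

def pvProj (a : Char) (q : PvQ) : Int :=
  if a = 'R' then q.1 else if a = 'T' then q.2.1 else if a = 'C' then q.2.2.1
  else if a = 'F' then q.2.2.2.1 else if a = 'J' then q.2.2.2.2.1
  else if a = 'M' then q.2.2.2.2.2.1 else if a = 'A' then q.2.2.2.2.2.2.1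
  else if a = 'N' then q.2.2.2.2.2.2.2 else 0

def pvEight : List Char := ['R', 'T', 'C', 'F', 'J', 'M', 'A', 'N']

-- generic: an index loop over range(len(xs)) reading xs[k] and ys[k] is a fold over zip(xs, ys)
theorem pv_foldl_idx_eq_zip {A B G : Type} (f : G -> A -> B -> G) (da : A) (db : B) :
    forall (xs : List A) (ys : List B) (init : G), xs.length <= ys.length ->
    (List.range xs.length).foldl (fun acc k => f acc (xs.getD k da) (ys.getD k db)) init
      = (xs.zip ys).foldl (fun acc p => f acc p.1 p.2) init := by
  intro xs
  induction xs with
  | nil => simp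
  | cons x xs ih =>
    intro ys init h
    cases ys with
    | nil => simp at h
    | cons y ys =>
      simp only [List.length_cons]
      rw [List.range_succ_eq_map]
      simp only [List.foldl_cons, List.foldl_map, List.getD_cons_zero, List.getD_cons_succ,
        List.zip_cons_cons]
      exact ih ys (f init x y) (by simpa using h)

theorem pv_bumpA_mkT (c : Char) (pts : Int) (q : PvQ) :
    pvBumpA c pts (pvMkT q) = pvMkT (pvAddQ q c pts) := by
  simp only [pvMkT, pvBumpA, pvAddQ]
  split_ifs <;> rfl

theorem pv_stepA_mkT (q : PvQ) (s : String) (choice : Int) :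
    (if choice < 4 then
      pvBumpA ((PySem.Str.pyGet? s 0).getD ' ') (if choice = 1 then 3 else if choice = 2 then 2 else 1) (pvMkT q)
    else if 5 <= choice then
      pvBumpA ((PySem.Str.pyGet? s 1).getD ' ') (if choice = 5 then 1 else if choice = 6 then 2 else 3) (pvMkT q)
    else pvMkT q) = pvMkT (pvStepQ q (s, choice)) := by
  simp only [pvStepQ, pv_bumpA_mkT]
  split_ifs <;> rfl

def pvBodyA (ts : List (Int × Char × Int)) (p : String × Int) : List (Int × Char × Int) :=
  if p.2 < 4 then
    pvBumpA ((PySem.Str.pyGet? p.1 0).getD ' ') (if p.2 = 1 then 3 else if p.2 = 2 then 2 else 1) ts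
  else if 5 <= p.2 then
    pvBumpA ((PySem.Str.pyGet? p.1 1).getD ' ') (if p.2 = 5 then 1 else if p.2 = 6 then 2 else 3) ts
  else ts

theorem pv_foldA (ps : List (String × Int)) : forall (q : PvQ),
    ps.foldl pvBodyA (pvMkT q) = pvMkT (ps.foldl pvStepQ q) := by
  induction ps with
  | nil => intro q; rfl
  | cons p ps ih => intro q; simp only [List.foldl_cons, pvBodyA, pv_stepA_mkT, ih]

-- B side: pvProj a tracks exactly the coordinate pvAddQ bumps
theorem pv_addR (q : PvQ) (c : Char) (pts : Int) :
    (pvAddQ q c pts).1 = q.1 + (if c = 'R' then pts else 0) := by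
  unfold pvAddQ; split_ifs <;> simp_all

theorem pv_addT (q : PvQ) (c : Char) (pts : Int) :
    (pvAddQ q c pts).2.1 = q.2.1 + (if c = 'T' then pts else 0) := by
  unfold pvAddQ; split_ifs <;> simp_all

theorem pv_addC (q : PvQ) (c : Char) (pts : Int) :
    (pvAddQ q c pts).2.2.1 = q.2.2.1 + (if c = 'C' then pts else 0) := by
  unfold pvAddQ; split_ifs <;> simp_all

theorem pv_addF (q : PvQ) (c : Char) (pts : Int) :
    (pvAddQ q c pts).2.2.2.1 = q.2.2.2.1 + (if c = 'F' then pts else 0) := by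
  unfold pvAddQ; split_ifs <;> simp_all

theorem pv_addJ (q : PvQ) (c : Char) (pts : Int) :
    (pvAddQ q c pts).2.2.2.2.1 = q.2.2.2.2.1 + (if c = 'J' then pts else 0) := by
  unfold pvAddQ; split_ifs <;> simp_all

theorem pv_addM (q : PvQ) (c : Char) (pts : Int) :
    (pvAddQ q c pts).2.2.2.2.2.1 = q.2.2.2.2.2.1 + (if c = 'M' then pts else 0) := by
  unfold pvAddQ; split_ifs <;> simp_all

theorem pv_addA (q : PvQ) (c : Char) (pts : Int) :
    (pvAddQ q c pts).2.2.2.2.2.2.1 = q.2.2.2.2.2.2.1 + (if c = 'A' then pts else 0) := by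
  unfold pvAddQ; split_ifs <;> simp_all

theorem pv_addN (q : PvQ) (c : Char) (pts : Int) :
    (pvAddQ q c pts).2.2.2.2.2.2.2 = q.2.2.2.2.2.2.2 + (if c = 'N' then pts else 0) := by
  unfold pvAddQ; split_ifs <;> simp_all

theorem pv_proj_add (a : Char) (ha : a ∈ pvEight) (q : PvQ) (c : Char) (pts : Int) :
    pvProj a (pvAddQ q c pts) = pvProj a q + (if c = a then pts else 0) := by
  fin_cases ha
  · exact pv_addR q c pts
  · exact pv_addT q c pts
  · exact pv_addC q c pts
  · exact pv_addF q c pts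
  · exact pv_addJ q c pts
  · exact pv_addM q c pts
  · exact pv_addA q c pts
  · exact pv_addN q c pts

theorem pv_signed_split (a b l : Char) (hab : a ≠ b) (pts : Int) :
    (if l = a then pts else if l = b then -pts else 0)
      = (if l = a then pts else 0) - (if l = b then pts else 0) := by
  by_cases h1 : l = a <;> by_cases h2 : l = b <;> simp_all

theorem pv_diff_step (a b : Char) (ha : a ∈ pvEight) (hb : b ∈ pvEight) (hab : a ≠ b)
    (t : Int) (q : PvQ) (p : String × Int) :
    pvDiffStepB a b t p
      = t + ((pvProj a (pvStepQ q p) - pvProj b (pvStepQ q p)) - (pvProj a q - pvProj b q)) := by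
  unfold pvDiffStepB pvStepQ
  simp only [show ((4 : Int) < p.2 ↔ 5 ≤ p.2) from by omega]
  by_cases h1 : p.2 < 4
  · simp only [if_pos h1]
    rw [pv_signed_split a b _ hab, pv_proj_add a ha, pv_proj_add b hb]
    omega
  · simp only [if_neg h1]
    by_cases h2 : 5 ≤ p.2
    · simp only [if_pos h2]
      rw [pv_signed_split a b _ hab, pv_proj_add a ha, pv_proj_add b hb]
      omega
    · simp only [if_neg h2]
      omega

theorem pv_diff_fold (a b : Char) (ha : a ∈ pvEight) (hb : b ∈ pvEight) (hab : a ≠ b)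
    (ps : List (String × Int)) : forall (t : Int) (q : PvQ),
    ps.foldl (pvDiffStepB a b) t
      = t + ((pvProj a (ps.foldl pvStepQ q) - pvProj b (ps.foldl pvStepQ q)) - (pvProj a q - pvProj b q)) := by
  induction ps with
  | nil => intro t q; simp
  | cons p ps ih =>
    intro t q
    rw [List.foldl_cons, List.foldl_cons, pv_diff_step a b ha hb hab t q p, ih _ (pvStepQ q p)]
    omega

theorem pv_diffB (survey : List String) (choices : List Int) (a b : Char)
    (ha : a ∈ pvEight) (hb : b ∈ pvEight) (hab : a ≠ b) :
    pvDiffB survey choices a b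
      = pvProj a ((survey.zip choices).foldl pvStepQ (0, 0, 0, 0, 0, 0, 0, 0))
        - pvProj b ((survey.zip choices).foldl pvStepQ (0, 0, 0, 0, 0, 0, 0, 0)) := by
  unfold pvDiffB
  rw [pv_diff_fold a b ha hb hab _ 0 (0, 0, 0, 0, 0, 0, 0, 0)]
  have h0 : ∀ c ∈ pvEight, pvProj c (0, 0, 0, 0, 0, 0, 0, 0) = 0 := by
    intro c hc; fin_cases hc <;> simp [pvProj]
  rw [h0 a ha, h0 b hb]
  omega

-- the sorted table is the four pairwise picks in group order
def pvPick2 (g : Int) (chi clo : Char) (x y : Int) : List (Int × Char × Int) :=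
  if y <= x then [(g, chi, x), (g, clo, y)] else [(g, clo, y), (g, chi, x)]

def pvKey (x : Int × Char × Int) : Int ×ₗ (Int ×ₗ Char) := toLex (x.1, toLex (-x.2.2, x.2.1))

theorem pv_keylt_lo {g x y : Int} {c1 c2 : Char} (h : y <= x) (hc : c1 < c2) :
    pvKey (g, c1, x) < pvKey (g, c2, y) := by
  unfold pvKey
  dsimp only
  rw [Prod.Lex.toLex_lt_toLex]
  refine Or.inr ⟨rfl, ?_⟩
  rw [Prod.Lex.toLex_lt_toLex]
  rcases lt_or_eq_of_le h with h' | h'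
  · exact Or.inl (by omega)
  · exact Or.inr ⟨by omega, hc⟩

theorem pv_keylt_swap {g x y : Int} {c1 c2 : Char} (h : x < y) :
    pvKey (g, c1, y) < pvKey (g, c2, x) := by
  unfold pvKey
  dsimp only
  rw [Prod.Lex.toLex_lt_toLex]
  refine Or.inr ⟨rfl, ?_⟩
  rw [Prod.Lex.toLex_lt_toLex]
  exact Or.inl (by omega)

theorem pv_keylt_group {e e' : Int × Char × Int} (h : e.1 < e'.1) : pvKey e < pvKey e' := by
  unfold pvKey
  rw [Prod.Lex.toLex_lt_toLex]
  exact Or.inl h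

theorem pv_mem_pick2_fst {g x y : Int} {c1 c2 : Char} {e : Int × Char × Int}
    (h : e ∈ pvPick2 g c1 c2 x y) : e.1 = g := by
  unfold pvPick2 at h
  split_ifs at h <;> simp only [List.mem_cons, List.not_mem_nil, or_false] at h <;>
    rcases h with rfl | rfl <;> rfl

theorem pv_pick2_perm (g x y : Int) (c1 c2 : Char) :
    (pvPick2 g c1 c2 x y).Perm [(g, c1, x), (g, c2, y)] := by
  unfold pvPick2
  split_ifs
  · exact List.Perm.refl _
  · exact List.Perm.swap _ _ _

theorem pv_pick2_pairwise {g x y : Int} {c1 c2 : Char} (hc : c1 < c2) :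
    (pvPick2 g c1 c2 x y).Pairwise (fun a b => pvKey a < pvKey b) := by
  unfold pvPick2
  split_ifs with h
  · exact List.pairwise_pair.mpr (pv_keylt_lo h hc)
  · exact List.pairwise_pair.mpr (pv_keylt_swap (by omega))

theorem pv_sorted_mkT (q : PvQ) :
    PySem.List.sorted (pvMkT q) (fun x => toLex (x.1, toLex (-x.2.2, x.2.1))) false
      = pvPick2 1 'R' 'T' q.1 q.2.1 ++ (pvPick2 2 'C' 'F' q.2.2.1 q.2.2.2.1 ++
        (pvPick2 3 'J' 'M' q.2.2.2.2.1 q.2.2.2.2.2.1 ++ pvPick2 4 'A' 'N' q.2.2.2.2.2.2.1 q.2.2.2.2.2.2.2)) := by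
  have hkey : (fun x : Int × Char × Int => toLex (x.1, toLex (-x.2.2, x.2.1))) = pvKey := rfl
  rw [hkey]
  apply PySem.List.sorted_eq_of_perm_of_pairwise_lt
  · have hmk : pvMkT q = [(1, 'R', q.1), (1, 'T', q.2.1)] ++ ([(2, 'C', q.2.2.1), (2, 'F', q.2.2.2.1)] ++
        ([(3, 'J', q.2.2.2.2.1), (3, 'M', q.2.2.2.2.2.1)] ++ [(4, 'A', q.2.2.2.2.2.2.1), (4, 'N', q.2.2.2.2.2.2.2)])) := rfl
    rw [hmk]
    exact (pv_pick2_perm _ _ _ _ _).append ((pv_pick2_perm _ _ _ _ _).append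
      ((pv_pick2_perm _ _ _ _ _).append (pv_pick2_perm _ _ _ _ _)))
  · have cross : ∀ (g g' x y x' y' : Int) (c1 c2 c1' c2' : Char), g < g' →
        ∀ a ∈ pvPick2 g c1 c2 x y, ∀ b ∈ pvPick2 g' c1' c2' x' y', pvKey a < pvKey b := by
      intro g g' x y x' y' c1 c2 c1' c2' hg a ha b hb
      exact pv_keylt_group (by rw [pv_mem_pick2_fst ha, pv_mem_pick2_fst hb]; exact hg)
    refine List.pairwise_append.mpr ⟨pv_pick2_pairwise (by decide), ?_, ?_⟩
    · refine List.pairwise_append.mpr ⟨pv_pick2_pairwise (by decide), ?_, ?_⟩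
      · refine List.pairwise_append.mpr ⟨pv_pick2_pairwise (by decide), pv_pick2_pairwise (by decide), ?_⟩
        · exact cross 3 4 _ _ _ _ _ _ _ _ (by norm_num)
      · intro a ha b hb
        rcases List.mem_append.mp hb with hb' | hb'
        · exact cross 2 3 _ _ _ _ _ _ _ _ (by norm_num) a ha b hb'
        · exact cross 2 4 _ _ _ _ _ _ _ _ (by norm_num) a ha b hb'
    · intro a ha b hb
      rcases List.mem_append.mp hb with hb' | hb'
      · exact cross 1 2 _ _ _ _ _ _ _ _ (by norm_num) a ha b hb'
      · rcases List.mem_append.mp hb' with hb'' | hb''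
        · exact cross 1 3 _ _ _ _ _ _ _ _ (by norm_num) a ha b hb''
        · exact cross 1 4 _ _ _ _ _ _ _ _ (by norm_num) a ha b hb''

theorem pv_pickA_eight (e1 e2 e3 e4 e5 e6 e7 e8 : Int × Char × Int) :
    pvPickA [e1, e2, e3, e4, e5, e6, e7, e8] 0 [] = [e1.2.1, e3.2.1, e5.2.1, e7.2.1] := by
  simp [pvPickA, PySem.List.pyGetD]

theorem pv_A_loop (survey : List String) (choices : List Int)
    (h : survey.length <= choices.length) (init : List (Int × Char × Int)) :
    (PySem.List.pyRange 0 (PySem.List.len survey) 1).foldl (fun ts i =>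
      let s := PySem.List.pyGetD survey i ""
      let choice := PySem.List.pyGetD choices i 0
      if choice < 4 then
        pvBumpA ((PySem.Str.pyGet? s 0).getD ' ') (if choice = 1 then 3 else if choice = 2 then 2 else 1) ts
      else if 5 <= choice then
        pvBumpA ((PySem.Str.pyGet? s 1).getD ' ') (if choice = 5 then 1 else if choice = 6 then 2 else 3) ts
      else ts) init
    = (survey.zip choices).foldl pvBodyA init := by
  rw [PySem.List.len_eq, PySem.List.pyRange_zero_natCast, List.foldl_map]
  simp only [PySem.List.pyGetD_natCast]
  exact pv_foldl_idx_eq_zip (fun ts s choice => pvBodyA ts (s, choice)) "" 0 survey choices init h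

theorem pv_main (survey : List String) (choices : List Int)
    (h : survey.length <= choices.length) :
    solution survey choices = solution_alt survey choices := by
  unfold solution solution_alt
  simp only [pv_A_loop survey choices h]
  rw [show ((PySem.List.pyRange 1 5 1).foldl (fun acc i =>
      if i = 1 then acc ++ [(i, 'R', 0)] ++ [(i, 'T', 0)]
      else if i = 2 then acc ++ [(i, 'C', 0)] ++ [(i, 'F', 0)]
      else if i = 3 then acc ++ [(i, 'J', 0)] ++ [(i, 'M', 0)]
      else acc ++ [(i, 'A', 0)] ++ [(i, 'N', 0)]) ([] : List (Int × Char × Int)))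
    = pvMkT (0, 0, 0, 0, 0, 0, 0, 0) from by decide]
  rw [pv_foldA, pv_sorted_mkT]
  simp only [List.map,
    pv_diffB survey choices 'R' 'T' (by decide) (by decide) (by decide),
    pv_diffB survey choices 'C' 'F' (by decide) (by decide) (by decide),
    pv_diffB survey choices 'J' 'M' (by decide) (by decide) (by decide),
    pv_diffB survey choices 'A' 'N' (by decide) (by decide) (by decide)]
  generalize (survey.zip choices).foldl pvStepQ (0, 0, 0, 0, 0, 0, 0, 0) = q
  have hR : pvProj 'R' q = q.1 := rfl
  have hT : pvProj 'T' q = q.2.1 := rfl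
  have hC : pvProj 'C' q = q.2.2.1 := rfl
  have hF : pvProj 'F' q = q.2.2.2.1 := rfl
  have hJ : pvProj 'J' q = q.2.2.2.2.1 := rfl
  have hM : pvProj 'M' q = q.2.2.2.2.2.1 := rfl
  have hA : pvProj 'A' q = q.2.2.2.2.2.2.1 := rfl
  have hN : pvProj 'N' q = q.2.2.2.2.2.2.2 := rfl
  simp only [hR, hT, hC, hF, hJ, hM, hA, hN, sub_nonneg, pvPick2]
  split_ifs <;> simp only [List.cons_append, List.nil_append, pv_pickA_eight]

-- ===== VERDICT (by name: the statement is the Claim_ definition above) =====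
theorem solution_spec : Claim_equal_solution := by
  intro survey choices _ hpre
  unfold Spec_solution
  exact pv_main survey choices hpre.1
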